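-- pv_equiv track=rewrite | github.com/nflath/Moebius | linear.py | all_combinations_not_calculated
-- ===== SOURCE A (Python) =====
-- import itertools
--
-- def all_combinations_not_calculated(all_confusions, z_calculated):
--     all_potential_useful_z = set()
--     for x in all_confusions:
--         for y in range(1,len(x)):
--             for z in itertools.combinations(x,y):
--                 if tuple(z) not in z_calculated:
--                     all_potential_useful_z.add(z)
--     return all_potential_useful_z
-- ===== SOURCE B (Python) =====
-- def all_combinations_not_calculated(all_confusions, z_calculated):
--     z_set = {tuple(z) for z in z_calculated}
--     result = set()
--     for x in all_confusions:
--         # rows[k] = all size-k combinations of x (index order), built in one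
--         # Pascal-triangle pass over x from the right
--         rows = [[()]]
--         for a in reversed(x):
--             new_rows = [[()]]
--             for k in range(1, len(rows) + 1):
--                 prev = rows[k - 1]
--                 cur = rows[k] if k < len(rows) else []
--                 new_rows.append([(a,) + t for t in prev] + cur)
--             rows = new_rows
--         for row in rows[1:len(x)]:  # proper nonempty sizes: 1 .. len(x)-1
--             for t in row:
--                 if t not in z_set:
--                     result.add(t)
--     return result
-- ===== Notes on version B (the rewrite author's own statement) =====
-- stated objective: alternative
-- what changed: B builds, per x, all combination sizes at once with a Pascal-triangle DP over x (one pass producing rows[k] = the size-k combinations, then the proper nonempty rows are scanned) instead of a separate itertools.combinations(x, y) call per size, and the already-calculated lookup goes through a set built once from z_calculated.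
import Mathlib
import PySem

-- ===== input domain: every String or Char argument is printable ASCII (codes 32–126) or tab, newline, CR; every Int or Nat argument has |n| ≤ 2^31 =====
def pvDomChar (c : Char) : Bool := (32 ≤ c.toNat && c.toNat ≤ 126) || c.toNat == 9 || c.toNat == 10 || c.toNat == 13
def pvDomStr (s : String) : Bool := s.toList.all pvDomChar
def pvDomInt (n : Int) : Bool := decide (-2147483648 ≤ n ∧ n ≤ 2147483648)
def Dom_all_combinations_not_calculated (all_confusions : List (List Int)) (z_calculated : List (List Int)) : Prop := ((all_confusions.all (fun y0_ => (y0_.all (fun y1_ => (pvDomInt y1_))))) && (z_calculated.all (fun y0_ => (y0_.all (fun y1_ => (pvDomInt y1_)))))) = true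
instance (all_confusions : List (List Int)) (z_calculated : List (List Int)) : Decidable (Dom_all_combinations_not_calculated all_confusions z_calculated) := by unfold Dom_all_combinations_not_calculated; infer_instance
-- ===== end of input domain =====

-- B builds all combination sizes of each x in one Pascal-triangle pass over x (rows[k] = the
-- size-k combinations) and tests each subset against a set built once from z_calculated,
-- instead of one itertools.combinations(x, y) call per size (alternative decomposition, same cost).

-- ===== PORT A =====
-- itertools.combinations(x, y): length-y subsequences of x, in the library's emission order
def pyCombos : Nat → List Int → List (List Int)
  | 0, _ => [[]]
  | _ + 1, [] => []
  | y + 1, a :: r => (pyCombos y r).map (fun t => a :: t) ++ pyCombos (y + 1) r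

def all_combinations_not_calculated (all_confusions : List (List Int)) (z_calculated : List (List Int)) : List (List Int) :=
  all_confusions.foldl (fun s x =>
    (PySem.List.pyRange 1 (Int.ofNat x.length) 1).foldl (fun s y =>
      (pyCombos y.toNat x).foldl (fun s z =>
        if PySem.Set.contains z_calculated z then s else PySem.Set.add s z) s) s)
    PySem.Set.empty

-- ===== PORT B =====
-- the inner 'for k in range(1, len(rows)+1)' walk: new_rows[k] = [(a,)+t for t in rows[k-1]] + rows[k]
def stepAux (a : Int) : List (List (List Int)) → List (List (List Int))
  | [] => []
  | [p] => [p.map (fun t => a :: t)]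
  | p :: c :: rest => (p.map (fun t => a :: t) ++ c) :: stepAux a (c :: rest)

-- 'for a in reversed(x): rows = [[()]] + step' — a right fold over x starting from [[()]]
def buildRows (x : List Int) : List (List (List Int)) :=
  x.foldr (fun a rows => [[]] :: stepAux a rows) [[[]]]

def all_combinations_not_calculated_alt (all_confusions : List (List Int)) (z_calculated : List (List Int)) : List (List Int) :=
  let zset := PySem.Set.ofList z_calculated
  all_confusions.foldl (fun s x =>
    let rows := buildRows x
    (PySem.List.slice rows (some 1) (some (Int.ofNat x.length))).foldl (fun s row =>
      row.foldl (fun s t =>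
        if PySem.Set.contains zset t then s else PySem.Set.add s t) s) s)
    PySem.Set.empty

-- ===== PRECONDITION & SPEC =====
def Spec_all_combinations_not_calculated (all_confusions : List (List Int)) (z_calculated : List (List Int)) (out : List (List Int)) : Prop := out = all_combinations_not_calculated_alt all_confusions z_calculated
instance (all_confusions : List (List Int)) (z_calculated : List (List Int)) (out : List (List Int)) : Decidable (Spec_all_combinations_not_calculated all_confusions z_calculated out) := by unfold Spec_all_combinations_not_calculated; infer_instance

-- ===== CLAIM (what is proved, stated in full; the proofs are below) =====
def Claim_equal_all_combinations_not_calculated : Prop := ∀ (all_confusions : List (List Int)) (z_calculated : List (List Int)), Dom_all_combinations_not_calculated all_confusions z_calculated → Spec_all_combinations_not_calculated all_confusions z_calculated (all_combinations_not_calculated all_confusions z_calculated)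

-- ===== LEMMAS AND PROOFS =====

theorem pyCombos_eq_nil_of_lt (k : Nat) (x : List Int) (h : x.length < k) : pyCombos k x = [] := by
  induction x generalizing k with
  | nil => cases k with | zero => omega | succ k => rfl
  | cons a r ih =>
    cases k with
    | zero => omega
    | succ k =>
      simp [pyCombos]
      constructor
      · exact ih k (by simpa using h)
      · exact ih (k + 1) (by simp at h ⊢; omega)

-- the Pascal step, applied to a rows table, produces the next rows table
theorem stepAux_map (a : Int) (m : Nat) (g : Nat → List (List Int)) (hg : ∀ j, m < j → g j = []) :
    stepAux a ((List.range (m + 1)).map g) =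
      (List.range (m + 1)).map (fun k => (g k).map (fun t => a :: t) ++ g (k + 1)) := by
  induction m generalizing g with
  | zero =>
    rw [List.range_one, List.map_singleton, List.map_singleton]
    rw [hg 1 (by omega)]
    simp [stepAux]
  | succ m ih =>
    have hr : ∀ (h : Nat → List (List Int)), (List.range (m + 2)).map h
        = h 0 :: (List.range (m + 1)).map (fun k => h (k + 1)) := by
      intro h
      rw [List.range_succ_eq_map]
      simp [Function.comp]
    rw [hr g, hr (fun k => (g k).map (fun t => a :: t) ++ g (k + 1))]
    have htail : (List.range (m + 1)).map (fun k => g (k + 1)) = g 1 :: (List.range m).map (fun k => g (k + 2)) := by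
      rw [List.range_succ_eq_map]; simp [Function.comp]
    rw [htail]
    rw [show stepAux a (g 0 :: g 1 :: (List.range m).map fun k => g (k + 2)) =
        ((g 0).map (fun t => a :: t) ++ g 1) :: stepAux a (g 1 :: (List.range m).map fun k => g (k + 2)) from rfl]
    have := ih (fun k => g (k + 1)) (fun j hj => hg (j + 1) (by omega))
    rw [htail] at this
    rw [this]

theorem buildRows_eq (x : List Int) :
    buildRows x = (List.range (x.length + 1)).map (fun k => pyCombos k x) := by
  induction x with
  | nil => simp [buildRows, pyCombos]
  | cons a r ih =>
    have h1 : buildRows (a :: r) = [[]] :: stepAux a (buildRows r) := rfl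
    rw [h1, ih, stepAux_map a r.length (fun k => pyCombos k r)
      (fun j hj => pyCombos_eq_nil_of_lt j r hj)]
    simp only [List.length_cons]
    rw [List.range_succ_eq_map (n := r.length + 1)]
    simp only [List.map_cons, List.map_map]
    rfl

theorem drop_take_range (n : Nat) : ((List.range (n + 1)).drop 1).take (n - 1) = List.range' 1 (n - 1) := by
  apply List.ext_getElem
  · simp
  · intro i h1 h2
    simp only [List.getElem_take, List.getElem_drop, List.getElem_range, List.getElem_range']
    omega

-- looking a subset up in set(z_calculated) is looking it up in z_calculated
theorem contains_ofList_eq (zc : List (List Int)) (t : List Int) :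
    PySem.Set.contains (PySem.Set.ofList zc) t = PySem.Set.contains zc t := by
  by_cases h : t ∈ zc
  · rw [(PySem.Set.contains_iff _ _).mpr ((PySem.Set.mem_ofList _ _).mpr h),
      (PySem.Set.contains_iff _ _).mpr h]
  · have h1 : PySem.Set.contains (PySem.Set.ofList zc) t = false := by
      rw [Bool.eq_false_iff]
      intro hc
      exact h ((PySem.Set.mem_ofList _ _).mp ((PySem.Set.contains_iff _ _).mp hc))
    have h2 : PySem.Set.contains zc t = false := by
      rw [Bool.eq_false_iff]
      intro hc
      exact h ((PySem.Set.contains_iff _ _).mp hc)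
    rw [h1, h2]

-- A's per-x step (sizes 1..n-1 via itertools) equals B's per-x step (sliced Pascal rows)
theorem step_eq (x : List Int) (zc : List (List Int)) (s : PySem.Set (List Int)) :
    (PySem.List.pyRange 1 (Int.ofNat x.length) 1).foldl (fun s y =>
      (pyCombos y.toNat x).foldl (fun s z =>
        if PySem.Set.contains zc z then s else PySem.Set.add s z) s) s
    = (PySem.List.slice (buildRows x) (some 1) (some (Int.ofNat x.length))).foldl (fun s row =>
        row.foldl (fun s t =>
          if PySem.Set.contains (PySem.Set.ofList zc) t then s else PySem.Set.add s t) s) s := by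
  have hslice : PySem.List.slice (buildRows x) (some (1 : Int)) (some (Int.ofNat x.length))
      = (List.range' 1 (x.length - 1)).map (fun k => pyCombos k x) := by
    rw [buildRows_eq]
    rw [show (1 : Int) = ((1 : Nat) : Int) from rfl, show Int.ofNat x.length = ((x.length : Nat) : Int) from rfl,
      PySem.List.slice_natCast]
    rw [← List.map_drop, ← List.map_take, drop_take_range]
  have hrange : PySem.List.pyRange 1 (Int.ofNat x.length) 1
      = (List.range' 1 (x.length - 1)).map (fun k => Int.ofNat k) := by
    rw [PySem.List.pyRange_one, List.range'_eq_map_range, List.map_map]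
    have ht : ((Int.ofNat x.length) - 1).toNat = x.length - 1 := by
      rw [Int.ofNat_eq_natCast]; omega
    rw [ht]
    apply List.map_congr_left
    intro k _
    simp only [Function.comp, Int.ofNat_eq_natCast]
    omega
  rw [hslice, hrange, List.foldl_map, List.foldl_map]
  apply PySem.List.foldl_congr_mem
  intro s' k _
  simp only [Int.ofNat_eq_natCast, Int.toNat_natCast]
  apply PySem.List.foldl_congr_mem
  intro s'' t _
  rw [contains_ofList_eq]

theorem unchanged_aux (ac zc : List (List Int)) :
    all_combinations_not_calculated ac zc = all_combinations_not_calculated_alt ac zc := by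
  simp only [all_combinations_not_calculated, all_combinations_not_calculated_alt]
  apply PySem.List.foldl_congr_mem
  intro s x _
  exact step_eq x zc s

-- ===== VERDICT (by name: the statement is the Claim_ definition above) =====
theorem all_combinations_not_calculated_spec : Claim_equal_all_combinations_not_calculated := by
  intro ac zc _
  exact unchanged_aux ac zc
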